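-- pv_equiv track=rewrite | github.com/khesly1903/terminal-ASCII-timer | timer.py | side_by_side_small
-- ===== SOURCE A (Python) =====
-- def side_by_side_small(art1, art2):
--
--     art1_lines = art1.split("\n")
--     art2_lines = art2.split("\n")
--     max_len = max(len(art1_lines), len(art2_lines))
--
--
--     art1_lines += [""] * (max_len - len(art1_lines))
--     art2_lines += [""] * (max_len - len(art2_lines))
--
--     combined = []
--     for line1, line2 in zip(art1_lines, art2_lines):
--         combined.append(line1 + "  " + line2)
--     return "\n".join(combined)
-- ===== SOURCE B (Python) =====
-- def side_by_side_small(art1, art2):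
--     def go(xs, ys):
--         if not xs and not ys:
--             return []
--         x = xs[0] if xs else ""
--         y = ys[0] if ys else ""
--         return [x + "  " + y] + go(xs[1:], ys[1:])
--     return "\n".join(go(art1.split("\n"), art2.split("\n")))
-- ===== Notes on version B (the rewrite author's own statement) =====
-- stated objective: simpler
-- what changed: Replaces the max-length computation and the two explicit padding steps with a single structural recursion over both line lists at once (a hand-rolled zip_longest with empty fill), so no length/padding bookkeeping is maintained.
import Mathlib
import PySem

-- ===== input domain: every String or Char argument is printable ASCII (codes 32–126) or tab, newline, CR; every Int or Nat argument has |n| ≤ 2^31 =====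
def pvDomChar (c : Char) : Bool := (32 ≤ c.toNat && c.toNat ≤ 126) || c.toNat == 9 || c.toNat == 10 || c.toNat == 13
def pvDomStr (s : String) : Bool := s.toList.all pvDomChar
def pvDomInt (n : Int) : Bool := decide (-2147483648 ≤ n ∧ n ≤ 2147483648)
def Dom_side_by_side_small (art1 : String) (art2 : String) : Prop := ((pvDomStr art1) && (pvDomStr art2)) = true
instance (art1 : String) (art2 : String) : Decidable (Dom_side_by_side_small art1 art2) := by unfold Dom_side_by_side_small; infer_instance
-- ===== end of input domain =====

-- B replaces A's max-length + two padding steps by one structural recursion over both line lists (simpler decomposition, same cost).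

-- ===== PORT A =====
def side_by_side_small (art1 : String) (art2 : String) : String :=
  let art1_lines := (PySem.Str.split? art1 "\n").getD []
  let art2_lines := (PySem.Str.split? art2 "\n").getD []
  let max_len := max art1_lines.length art2_lines.length
  let art1_lines := art1_lines ++ List.replicate (max_len - art1_lines.length) ""
  let art2_lines := art2_lines ++ List.replicate (max_len - art2_lines.length) ""
  let combined := (art1_lines.zip art2_lines).foldl
    (fun acc p => acc ++ [p.1 ++ "  " ++ p.2]) []
  PySem.Str.join "\n" combined

-- ===== PORT B =====
-- the inner helper 'go' of Source B: zip-longest with empty fill, by structural recursion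
def pvGoB : List String → List String → List String
  | [], [] => []
  | [], y :: ys => ("" ++ "  " ++ y) :: pvGoB [] ys
  | x :: xs, [] => (x ++ "  " ++ "") :: pvGoB xs []
  | x :: xs, y :: ys => (x ++ "  " ++ y) :: pvGoB xs ys

def side_by_side_small_alt (art1 : String) (art2 : String) : String :=
  PySem.Str.join "\n" (pvGoB ((PySem.Str.split? art1 "\n").getD []) ((PySem.Str.split? art2 "\n").getD []))

-- ===== PRECONDITION & SPEC =====
def Spec_side_by_side_small (art1 : String) (art2 : String) (out : String) : Prop := out = side_by_side_small_alt art1 art2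
instance (art1 : String) (art2 : String) (out : String) : Decidable (Spec_side_by_side_small art1 art2 out) := by unfold Spec_side_by_side_small; infer_instance

-- ===== CLAIM =====
def Claim_equal_side_by_side_small : Prop := ∀ (art1 : String) (art2 : String), Dom_side_by_side_small art1 art2 → Spec_side_by_side_small art1 art2 (side_by_side_small art1 art2)

-- ===== LEMMAS AND PROOFS =====
-- pad-to-max then zip-and-map equals the one-pass zip-longest recursion
theorem padZip_eq_pvGoB (xs ys : List String) :
    ((xs ++ List.replicate (max xs.length ys.length - xs.length) "").zip
      (ys ++ List.replicate (max xs.length ys.length - ys.length) "")).map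
      (fun p => p.1 ++ "  " ++ p.2) = pvGoB xs ys := by
  induction xs, ys using pvGoB.induct with
  | case1 => simp [pvGoB]
  | case2 y ys ih =>
      have h : max 0 (y :: ys).length - 0 = ys.length + 1 := by simp
      simp only [List.nil_append, List.length_nil, h] at *
      simpa [pvGoB, List.replicate_succ] using ih
  | case3 x xs ih =>
      have h : max (x :: xs).length 0 - 0 = xs.length + 1 := by simp
      simp only [List.nil_append, List.length_nil, h] at *
      simpa [pvGoB, List.replicate_succ] using ih
  | case4 x xs y ys ih =>
      simp [pvGoB, ih]

-- ===== VERDICT =====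
theorem side_by_side_small_spec : Claim_equal_side_by_side_small := by
  intro art1 art2 _
  unfold Spec_side_by_side_small side_by_side_small side_by_side_small_alt
  simp only [PySem.List.foldl_append_singleton_eq_map, List.nil_append]
  rw [padZip_eq_pvGoB]
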